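-- pv_equiv track=rewrite | github.com/adeshkin/khakas_corpus_scripts | clean_uchebniki.py | find_valid_enumeration
-- ===== SOURCE A (Python) =====
-- def find_valid_enumeration(text_to_check, min_items=4, max_words=2):
--     """
--     Проверяет, есть ли в тексте подряд идущее перечисление (min_items)
--     элементов, где каждый элемент состоит не более чем из (max_words) слов.
--     """
--
--     # 1. Разбиваем весь текст на элементы по запятой
--     # .strip() убирает лишние пробелы по краям (напр. " яблоко ")
--     items = [item.strip() for item in text_to_check.split(',')]
--
--     consecutive_valid_count = 0
--
--     # 2. Проходим по каждому элементу
--     for item in items: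
--         # 3. Считаем слова в элементе.
--         # .split() по умолчанию делит по пробелам
--         words = item.split()
--         word_count = len(words)
--
--         # 4. Проверяем условие
--         # Элемент валиден, если в нем есть слова (не пустой)
--         # и слов не больше, чем max_words
--         if 0 < word_count <= max_words:
--             # Если элемент подходит, увеличиваем счетчик
--             consecutive_valid_count += 1
--         else:
--             # Если элемент не подходит (например, 3 слова или пустой),
--             # сбрасываем счетчик подряд идущих
--             consecutive_valid_count = 0
--
--         # 5. Проверяем, не достигли ли мы цели
--         if consecutive_valid_count >= min_items:
--             # Нашли 3 (или больше) подряд!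
--             return True
--
--     # 6. Если прошли весь список и не нашли, возвращаем False
--     return False
-- ===== SOURCE B (Python) =====
-- def find_valid_enumeration(text_to_check, min_items=4, max_words=2):
--     # A run of length 0 (or less) always exists in the non-empty item list.
--     if min_items <= 0:
--         return True
--     items = text_to_check.split(',')
--     if min_items > len(items):
--         return False
--     # One validity flag character per item, then a plain substring search.
--     flags = ''.join('1' if 0 < len(item.strip().split()) <= max_words else '0'
--                     for item in items)
--     return '1' * min_items in flags
-- ===== Notes on version B (the rewrite author's own statement) =====
-- stated objective: alternative
-- what changed: Replaces the stateful consecutive-counter loop with early return by encoding each item's validity as one flag character of a string and reducing the run search to a substring test of min_items repeated valid-flag characters, with explicit handling of min_items <= 0 and of min_items exceeding the item count.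
import Mathlib
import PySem

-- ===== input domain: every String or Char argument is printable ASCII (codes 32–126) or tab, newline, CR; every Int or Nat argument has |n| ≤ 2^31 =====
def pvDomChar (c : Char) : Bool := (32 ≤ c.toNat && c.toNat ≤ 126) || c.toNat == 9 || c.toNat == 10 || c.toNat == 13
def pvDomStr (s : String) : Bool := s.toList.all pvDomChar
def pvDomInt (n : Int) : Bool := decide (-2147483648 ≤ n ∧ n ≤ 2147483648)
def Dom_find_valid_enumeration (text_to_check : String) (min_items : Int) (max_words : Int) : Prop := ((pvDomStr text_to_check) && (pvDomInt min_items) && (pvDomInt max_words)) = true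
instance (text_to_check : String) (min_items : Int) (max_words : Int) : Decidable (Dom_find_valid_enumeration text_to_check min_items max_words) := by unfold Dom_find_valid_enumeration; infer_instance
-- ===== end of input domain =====

-- ===== PORT A =====
-- B re-groups A's stateful counter loop into a flag string + substring search; return values proved equal.
def pvALoop (min_items max_words : Int) : List (List Char) → Int → Bool
  | [], _ => false
  | item :: rest, consecutive =>
    let word_count : Int := ((PySem.Chars.split₀ item).length : Int)
    let c' : Int := if 0 < word_count ∧ word_count ≤ max_words then consecutive + 1 else 0
    if min_items ≤ c' then true else pvALoop min_items max_words rest c'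

def find_valid_enumeration (text_to_check : String) (min_items : Int) (max_words : Int) : Bool :=
  let items := (PySem.Chars.splitOn text_to_check.toList [',']).map PySem.Chars.strip
  pvALoop min_items max_words items 0

-- ===== PORT B =====
def pvFlag (max_words : Int) (item : List Char) : Char :=
  let wc : Int := ((PySem.Chars.split₀ (PySem.Chars.strip item)).length : Int)
  if 0 < wc ∧ wc ≤ max_words then '1' else '0'

def find_valid_enumeration_alt (text_to_check : String) (min_items : Int) (max_words : Int) : Bool :=
  if min_items ≤ 0 then true
  else
    let items := PySem.Chars.splitOn text_to_check.toList [',']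
    if (items.length : Int) < min_items then false
    else
      let flags : List Char := items.map (pvFlag max_words)
      PySem.Chars.isIn (List.replicate min_items.toNat '1') flags

-- ===== PRECONDITION & SPEC =====
def Spec_find_valid_enumeration (text_to_check : String) (min_items : Int) (max_words : Int) (out : Bool) : Prop := out = find_valid_enumeration_alt text_to_check min_items max_words
instance (text_to_check : String) (min_items : Int) (max_words : Int) (out : Bool) : Decidable (Spec_find_valid_enumeration text_to_check min_items max_words out) := by unfold Spec_find_valid_enumeration; infer_instance

-- ===== CLAIM (what is proved, stated in full; the proofs are below) =====
def Claim_equal_find_valid_enumeration : Prop := ∀ (text_to_check : String) (min_items : Int) (max_words : Int), Dom_find_valid_enumeration text_to_check min_items max_words → Spec_find_valid_enumeration text_to_check min_items max_words (find_valid_enumeration text_to_check min_items max_words)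

-- ===== LEMMAS AND PROOFS =====

-- the flag of an already-stripped item (A's loop condition, as a character)
def pvFlagS (max_words : Int) (item : List Char) : Char :=
  if 0 < ((PySem.Chars.split₀ item).length : Int) ∧ ((PySem.Chars.split₀ item).length : Int) ≤ max_words then '1' else '0'

lemma pvTW_one (L : List Char) :
    List.takeWhile (fun x => x == '1') ('1' :: L) = '1' :: List.takeWhile (fun x => x == '1') L :=
  List.takeWhile_cons_of_pos (by simp)

lemma pvTW_zero (L : List Char) :
    List.takeWhile (fun x => x == '1') ('0' :: L) = [] :=
  List.takeWhile_cons_of_neg (by decide)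

lemma pvGo_ne_nil (sep : List Char) (fuel : Nat) (l cur : List Char) (acc : List (List Char)) :
    PySem.Chars.splitOn.go sep fuel l cur acc ≠ [] := by
  induction fuel generalizing l cur acc with
  | zero => simp [PySem.Chars.splitOn.go]
  | succ fuel ih =>
    cases l with
    | nil => simp [PySem.Chars.splitOn.go]
    | cons c rest =>
      rw [PySem.Chars.splitOn.go]
      split
      · exact ih _ _ _
      · exact ih _ _ _

lemma pvSplitOn_ne_nil (s sep : List Char) : PySem.Chars.splitOn s sep ≠ [] :=
  pvGo_ne_nil sep (s.length + 1) s [] []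

lemma pvReplicate_prefix_iff (n : Nat) (cs : List Char) :
    List.replicate n '1' <+: cs ↔ n ≤ (cs.takeWhile (fun x => x == '1')).length := by
  induction n generalizing cs with
  | zero => simp
  | succ n ih =>
    cases cs with
    | nil => simp [List.replicate_succ]
    | cons c cs' =>
      by_cases hc : c = '1'
      · subst hc
        rw [List.replicate_succ, List.cons_prefix_cons, pvTW_one, List.length_cons, ih]
        simp only [true_and]
        omega
      · constructor
        · intro h
          rw [List.replicate_succ, List.cons_prefix_cons] at h
          exact absurd h.1.symm hc
        · intro h
          rw [List.takeWhile_cons_of_neg (by simpa using hc)] at h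
          simp at h

lemma pvALoop_iff (mi mw : Int) (hmi : 1 ≤ mi) (items : List (List Char)) :
    ∀ (c : Int), 0 ≤ c → c < mi →
      (pvALoop mi mw items c = true ↔
        mi ≤ c + (((items.map (pvFlagS mw)).takeWhile (fun x => x == '1')).length : Int) ∨
        List.replicate mi.toNat '1' <:+: items.map (pvFlagS mw)) := by
  induction items with
  | nil =>
    intro c hc0 hcm
    simp only [pvALoop, List.map_nil, List.takeWhile_nil, List.length_nil]
    constructor
    · intro h; cases h
    · rintro (h | h)
      · simp at h; omega
      · rw [List.infix_nil] at h
        have hne : mi.toNat ≠ 0 := by omega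
        simp [List.replicate_eq_nil_iff, hne] at h
  | cons item rest ih =>
    intro c hc0 hcm
    by_cases hcond : 0 < ((PySem.Chars.split₀ item).length : Int) ∧ ((PySem.Chars.split₀ item).length : Int) ≤ mw
    · -- valid item: flag '1'
      have hflag : pvFlagS mw item = '1' := by unfold pvFlagS; rw [if_pos hcond]
      simp only [pvALoop, if_pos hcond, List.map_cons, hflag, pvTW_one, List.length_cons]
      by_cases hstop : mi ≤ c + 1
      · rw [if_pos hstop]
        constructor
        · intro _
          left
          push_cast
          omega
        · intro _; rfl
      · rw [if_neg hstop, ih (c + 1) (by omega) (by omega)]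
        rw [List.infix_cons_iff]
        have hpfx : List.replicate mi.toNat '1' <+: '1' :: rest.map (pvFlagS mw) ↔
            mi ≤ 1 + (((rest.map (pvFlagS mw)).takeWhile (fun x => x == '1')).length : Int) := by
          rw [pvReplicate_prefix_iff, pvTW_one, List.length_cons]
          omega
        rw [hpfx]
        push_cast
        constructor
        · rintro (h | h)
          · left; omega
          · right; right; exact h
        · rintro (h | h | h)
          · left; omega
          · left; omega
          · right; exact h
    · -- invalid item: flag '0', counter resets
      have hflag : pvFlagS mw item = '0' := by unfold pvFlagS; rw [if_neg hcond]
      simp only [pvALoop, if_neg hcond, List.map_cons, hflag, pvTW_zero, List.length_nil]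
      rw [if_neg (show ¬ mi ≤ (0 : Int) by omega), ih 0 le_rfl (by omega)]
      rw [List.infix_cons_iff]
      have hnpfx : ¬ List.replicate mi.toNat '1' <+: '0' :: rest.map (pvFlagS mw) := by
        rw [pvReplicate_prefix_iff, pvTW_zero, List.length_nil]
        omega
      have hpfx2 : mi ≤ (((rest.map (pvFlagS mw)).takeWhile (fun x => x == '1')).length : Int) →
          List.replicate mi.toNat '1' <:+: rest.map (pvFlagS mw) := by
        intro h
        exact ((pvReplicate_prefix_iff _ _).mpr (by omega)).isInfix
      constructor
      · rintro (h | h)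
        · right; right; exact hpfx2 (by omega)
        · right; right; exact h
      · rintro (h | h | h)
        · push_cast at h; omega
        · exact absurd h hnpfx
        · right; exact h

lemma pvFlag_eq (mw : Int) (x : List Char) : pvFlag mw x = pvFlagS mw (PySem.Chars.strip x) := by
  simp [pvFlag, pvFlagS]

-- ===== VERDICT (by name: the statement is the Claim_ definition above) =====
theorem find_valid_enumeration_spec : Claim_equal_find_valid_enumeration := by
  intro t mi mw _hdom
  unfold Spec_find_valid_enumeration
  simp only [find_valid_enumeration, find_valid_enumeration_alt]
  set itemsB := PySem.Chars.splitOn t.toList [','] with hitems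
  have hflags : itemsB.map (pvFlag mw) = (itemsB.map PySem.Chars.strip).map (pvFlagS mw) := by
    rw [List.map_map]
    exact List.map_congr_left (fun x _ => pvFlag_eq mw x)
  by_cases hmi : mi ≤ 0
  · rw [if_pos hmi]
    obtain ⟨it, rest, hcons⟩ := List.exists_cons_of_ne_nil
      (show itemsB.map PySem.Chars.strip ≠ [] by
        simp only [ne_eq, List.map_eq_nil_iff]; exact pvSplitOn_ne_nil _ _)
    rw [hcons]
    simp only [pvALoop]
    split
    · rw [if_pos (show mi ≤ (0:Int) + 1 by omega)]
    · rfl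
  · rw [if_neg hmi]
    have hmi1 : 1 ≤ mi := by omega
    have hmain := pvALoop_iff mi mw hmi1 (itemsB.map PySem.Chars.strip) 0 le_rfl (by omega)
    rw [zero_add] at hmain
    by_cases hlen : (itemsB.length : Int) < mi
    · rw [if_pos hlen, Bool.eq_false_iff, ne_eq, hmain]
      rintro (h | h)
      · have hle : ((((itemsB.map PySem.Chars.strip).map (pvFlagS mw)).takeWhile (fun x => x == '1')).length : Int) ≤ (itemsB.length : Int) := by
          have h1 := (List.takeWhile_prefix (l := (itemsB.map PySem.Chars.strip).map (pvFlagS mw)) (fun x => x == '1')).length_le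
          simp only [List.length_map] at h1
          exact_mod_cast h1
        omega
      · have hl2 := h.length_le
        simp only [List.length_replicate, List.length_map] at hl2
        omega
    · rw [if_neg hlen]
      have hiff := PySem.Chars.isIn_iff_infix (List.replicate mi.toNat '1') (itemsB.map (pvFlag mw))
      rw [hflags] at hiff
      rw [hflags]
      cases hA : pvALoop mi mw (itemsB.map PySem.Chars.strip) 0 with
      | false =>
        symm
        rw [Bool.eq_false_iff, ne_eq, hiff]
        rw [hA] at hmain
        intro hinf
        exact absurd (Or.inr hinf) ((not_iff_not.mpr hmain).mp (by simp))
      | true =>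
        symm
        rw [hiff]
        rw [hA] at hmain
        rcases hmain.mp rfl with h | h
        · exact ((pvReplicate_prefix_iff _ _).mpr (by omega)).isInfix
        · exact h
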